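-- pv_equiv track=rewrite | github.com/jness/dungeon_brawl | app/brawl.py | get_next_character_identifier
-- ===== SOURCE A (Python) =====
-- from string import ascii_uppercase
--
-- def get_next_character_identifier(brawl):
--     """
--     Get next identifier from brawl
--     """
--
--     # get a list of identifiers
--     identifiers = list(ascii_uppercase)
--
--     # iterate over all monsters removing their identifier from list
--     for monster in brawl:
--         try:
--             identifiers.remove(monster['identifier'])
--         except ValueError:
--             pass
--
--     # return the left most remaining identifier
--     return identifiers[0]
-- ===== SOURCE B (Python) =====
-- from string import ascii_uppercase
--
-- def get_next_character_identifier(brawl):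
--     """
--     Get next identifier from brawl
--     """
--     used = {monster['identifier'] for monster in brawl}
--     free = [c for c in ascii_uppercase if c not in used]
--     return free[0]
-- ===== Notes on version B (the rewrite author's own statement) =====
-- stated objective: simpler
-- what changed: Replaced the destructive remove-from-list loop with try/except by a one-pass set of used identifiers followed by a single filtering pass over the alphabet.
import Mathlib
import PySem

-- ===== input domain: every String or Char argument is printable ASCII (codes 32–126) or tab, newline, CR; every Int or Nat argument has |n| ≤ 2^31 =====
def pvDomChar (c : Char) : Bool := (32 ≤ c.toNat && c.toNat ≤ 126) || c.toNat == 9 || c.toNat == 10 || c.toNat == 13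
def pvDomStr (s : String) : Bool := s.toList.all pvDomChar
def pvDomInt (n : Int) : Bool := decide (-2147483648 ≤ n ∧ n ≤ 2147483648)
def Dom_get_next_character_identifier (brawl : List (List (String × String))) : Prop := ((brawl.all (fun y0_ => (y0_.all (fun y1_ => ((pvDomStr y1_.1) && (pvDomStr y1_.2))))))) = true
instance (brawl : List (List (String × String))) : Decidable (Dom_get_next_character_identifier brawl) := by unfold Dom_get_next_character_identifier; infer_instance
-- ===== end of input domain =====

-- B replaces A's destructive remove-from-list loop (with try/except) by a set of used
-- identifiers built in one pass plus a single filtering pass over the alphabet (simpler).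

-- ===== PORT A =====
-- list(ascii_uppercase)
def pvLetters : List String :=
  ["A","B","C","D","E","F","G","H","I","J","K","L","M",
   "N","O","P","Q","R","S","T","U","V","W","X","Y","Z"]

-- monster['identifier']; none = KeyError (excluded by Pre_); the port's .getD "" default
-- only matters outside Pre_
def pvIdOf (m : List (String × String)) : Option String :=
  (PySem.Dict.mk m).get? "identifier"

def get_next_character_identifier (brawl : List (List (String × String))) : String :=
  let identifiers :=
    brawl.foldl (fun ids monster =>
      match PySem.List.remove? ids ((pvIdOf monster).getD "") with
      | some ids' => ids'          -- remove succeeded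
      | none => ids)               -- except ValueError: pass
      pvLetters
  (PySem.List.pyGet? identifiers 0).getD ""   -- identifiers[0]; none = IndexError (excluded by Pre_)

-- ===== PORT B =====
def get_next_character_identifier_alt (brawl : List (List (String × String))) : String :=
  let used : PySem.Set String :=
    PySem.Set.ofList (brawl.map (fun monster => (pvIdOf monster).getD ""))
  let free := pvLetters.filter (fun c => !(PySem.Set.contains used c))
  (PySem.List.pyGet? free 0).getD ""          -- free[0]; none = IndexError (excluded by Pre_)

-- ===== PRECONDITION & SPEC =====
-- Pre_ excludes exactly the inputs where Python A raises: a monster without the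
-- 'identifier' key (KeyError) and brawls using all 26 letters (IndexError on [][0]).
def Pre_get_next_character_identifier (brawl : List (List (String × String))) : Prop :=
  (∀ m ∈ brawl, ((PySem.Dict.mk m).get? "identifier").isSome = true) ∧
  (∃ c ∈ pvLetters, ∀ m ∈ brawl, (PySem.Dict.mk m).get? "identifier" ≠ some c)

instance (brawl : List (List (String × String))) : Decidable (Pre_get_next_character_identifier brawl) := by
  unfold Pre_get_next_character_identifier; infer_instance

def pvWitness_get_next_character_identifier : (List (List (String × String))) :=
  [[("identifier", "A")], [("identifier", "C"), ("name", "orc")]]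

def Spec_get_next_character_identifier (brawl : List (List (String × String))) (out : String) : Prop := out = get_next_character_identifier_alt brawl
instance (brawl : List (List (String × String))) (out : String) : Decidable (Spec_get_next_character_identifier brawl out) := by unfold Spec_get_next_character_identifier; infer_instance

-- ===== CLAIM (what is proved, stated in full; the proofs are below) =====
def Claim_equal_get_next_character_identifier : Prop := ∀ (brawl : List (List (String × String))), Dom_get_next_character_identifier brawl → Pre_get_next_character_identifier brawl → Spec_get_next_character_identifier brawl (get_next_character_identifier brawl)

-- ===== LEMMAS AND PROOFS =====

-- one step of A's loop turns a filtered alphabet into a more filtered alphabet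
theorem pv_step_filter (f : String → Bool) (x : String) :
    (match PySem.List.remove? (pvLetters.filter f) x with
      | some ids' => ids'
      | none => pvLetters.filter f) =
    pvLetters.filter (fun c => f c && !(c == x)) := by
  by_cases hx : x ∈ pvLetters.filter f
  · rw [PySem.List.remove?_eq_some_erase _ _ hx,
      ((by decide : pvLetters.Nodup).filter f).erase_eq_filter x,
      List.filter_filter]
    exact List.filter_congr (fun c _ => by by_cases h : c = x <;> simp [h, bne, Bool.and_comm])
  · rw [(PySem.List.remove?_eq_none_iff _ _).mpr hx]
    refine (List.filter_congr (fun c hc => ?_)).symm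
    by_cases hf : f c
    · have : ¬ (c = x) := fun h => hx (by subst h; exact List.mem_filter.mpr ⟨hc, hf⟩)
      simp [hf, this]
    · simp [hf]

-- A's whole loop, over the list U of identifier strings, generalized over the start filter
theorem pv_fold_filter (U : List String) (f : String → Bool) :
    U.foldl (fun ids x =>
      match PySem.List.remove? ids x with
      | some ids' => ids'
      | none => ids) (pvLetters.filter f) =
    pvLetters.filter (fun c => f c && !(U.contains c)) := by
  induction U generalizing f with
  | nil => simp
  | cons x U ih =>
    simp only [List.foldl_cons]
    rw [pv_step_filter f x, ih]
    refine List.filter_congr (fun c _ => ?_)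
    by_cases h : c = x <;> by_cases hf : f c <;> simp [h, hf]

-- ===== VERDICT (by name: the statement is the Claim_ definition above) =====
theorem get_next_character_identifier_spec : Claim_equal_get_next_character_identifier := by
  intro brawl _ _
  unfold Spec_get_next_character_identifier
  unfold get_next_character_identifier get_next_character_identifier_alt
  have hfold :
      brawl.foldl (fun ids monster =>
        match PySem.List.remove? ids ((pvIdOf monster).getD "") with
        | some ids' => ids'
        | none => ids) pvLetters =
      pvLetters.filter (fun c => !((brawl.map (fun m => (pvIdOf m).getD "")).contains c)) := by
    have := pv_fold_filter (brawl.map (fun m => (pvIdOf m).getD "")) (fun _ => true)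
    simpa [List.foldl_map] using this
  rw [hfold]
  have hset : ∀ c : String,
      PySem.Set.contains (PySem.Set.ofList (brawl.map (fun m => (pvIdOf m).getD ""))) c =
      (brawl.map (fun m => (pvIdOf m).getD "")).contains c := by
    intro c
    by_cases h : c ∈ brawl.map (fun m => (pvIdOf m).getD "")
    · rw [(PySem.Set.contains_iff _ _).mpr ((PySem.Set.mem_ofList _ _).mpr h)]
      simpa using h
    · have : ¬ c ∈ PySem.Set.ofList (brawl.map (fun m => (pvIdOf m).getD "")) := by
        simpa [PySem.Set.mem_ofList] using h
      rw [Bool.eq_false_iff.mpr (fun hc => this ((PySem.Set.contains_iff _ _).mp hc))]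
      simpa using h
  simp only [hset]
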